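-- pv_equiv track=rewrite | github.com/henry753951/Encryption | Algorithms/StrangeShapeAlgorithm.py | PutTextDe
-- ===== SOURCE A (Python) =====
-- def PutTextDe(Nowmap, text):
--     index=0
--     for row in Nowmap:
--         for col_index in range(len(Nowmap[0])):
--             if index > len(text):
--                 break
--             if row[col_index] == '&':
--                 row[col_index]=text[index]
--                 index+=1
--
--     return Nowmap
-- ===== SOURCE B (Python) =====
-- def _fill_row(row, w, chunk):
--     # Rebuild one row: replace each '&' in the first w cells with the next
--     # character of this row's chunk; cells past w are kept as-is.
--     out, j = [], 0
--     for cell in row[:w]: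
--         if cell == '&':
--             out.append(chunk[j])
--             j += 1
--         else:
--             out.append(cell)
--     return out + row[w:]
--
--
-- def PutTextDe(Nowmap, text):
--     # Staged version: (1) count the '&' cells of each row (within the first
--     # len(Nowmap[0]) columns), (2) split text into one chunk per row by those
--     # counts, (3) rebuild each row independently from its chunk.
--     # Returns a NEW grid; unlike the original it does not mutate Nowmap.
--     w = len(Nowmap[0]) if Nowmap else 0
--     counts = [row[:w].count('&') for row in Nowmap]
--     chunks, pos = [], 0
--     for k in counts:
--         chunks.append(text[pos:pos + k])
--         pos += k
--     return [_fill_row(row, w, chunk) for row, chunk in zip(Nowmap, chunks)]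
-- ===== Notes on version B (the rewrite author's own statement) =====
-- stated objective: alternative
-- what changed: Replaces A's in-place nested index loops threading one global text index (with a break guard) by three staged passes: count the '&' cells per row, split the text into per-row chunks by those counts, then rebuild each row independently (purely, no mutation) from its own chunk.
import Mathlib
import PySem

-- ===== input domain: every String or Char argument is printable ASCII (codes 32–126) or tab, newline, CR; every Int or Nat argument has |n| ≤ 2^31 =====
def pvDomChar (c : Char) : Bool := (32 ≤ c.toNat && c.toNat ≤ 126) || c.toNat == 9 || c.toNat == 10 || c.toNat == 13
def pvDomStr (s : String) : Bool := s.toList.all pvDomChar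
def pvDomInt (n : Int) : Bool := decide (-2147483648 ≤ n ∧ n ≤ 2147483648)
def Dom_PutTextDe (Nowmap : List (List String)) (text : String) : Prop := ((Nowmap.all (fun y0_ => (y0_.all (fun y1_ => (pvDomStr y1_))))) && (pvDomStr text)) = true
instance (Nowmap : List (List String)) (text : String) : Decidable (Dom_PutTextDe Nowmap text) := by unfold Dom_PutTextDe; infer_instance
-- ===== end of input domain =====

-- B replaces A's in-place nested index loops (one global text index, break guard)
-- by staged passes: per-row '&' counts, per-row text chunks, independent row rebuild.
-- A mutates Nowmap in place, B returns a new grid; the theorem is about the returned value.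

-- ===== PORT A =====
-- inner 'for col_index in range(len(Nowmap[0]))' loop; state = (row, index).
-- 'if index > len(text): break' is modelled by leaving the state unchanged:
-- once true the state no longer changes, so skipping the rest equals breaking.
def pvInnerA (cs : List Char) (w : Nat) (row : List String) (i : Nat) : List String × Nat :=
  (List.range w).foldl (fun st c =>
    if st.2 > cs.length then st
    else if st.1.getD c "" == "&" then
      match cs[st.2]? with
      | some ch => (st.1.set c (String.ofList [ch]), st.2 + 1)
      | none => st      -- Python raises IndexError here; excluded by Pre_
    else st) (row, i)

-- outer 'for row in Nowmap' loop, threading index through the rows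
def pvLoopA (cs : List Char) (w : Nat) : List (List String) → Nat → List (List String) × Nat
  | [], i => ([], i)
  | row :: rest, i =>
      let ri := pvInnerA cs w row i
      let rst := pvLoopA cs w rest ri.2
      (ri.1 :: rst.1, rst.2)

def PutTextDe (Nowmap : List (List String)) (text : String) : List (List String) :=
  (pvLoopA text.toList (Nowmap.headD []).length Nowmap 0).1

-- ===== PORT B =====
-- '_fill_row' inner loop over row[:w]; state = (out, j)
def pvFillGo (chunk : List Char) : List String → List String → Nat → List String × Nat
  | [], out, j => (out, j)
  | cell :: rest, out, j =>
      if cell == "&" then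
        match chunk[j]? with
        | some ch => pvFillGo chunk rest (out ++ [String.ofList [ch]]) (j + 1)
        | none => (out, j)      -- Python raises IndexError here; excluded by Pre_
      else pvFillGo chunk rest (out ++ [cell]) j

def pvFillRow (row : List String) (w : Nat) (chunk : List Char) : List String :=
  (pvFillGo chunk (row.take w) [] 0).1 ++ row.drop w

-- 'for k in counts: chunks.append(text[pos:pos+k]); pos += k'
-- (text[pos:pos+k] with 0 ≤ pos, 0 ≤ k is exactly (drop pos).take k)
def pvChunksB (cs : List Char) : List Nat → Nat → List (List Char)
  | [], _ => []
  | k :: ks, pos => (cs.drop pos).take k :: pvChunksB cs ks (pos + k)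

def PutTextDe_alt (Nowmap : List (List String)) (text : String) : List (List String) :=
  let w := (Nowmap.headD []).length
  let counts := Nowmap.map (fun row => (row.take w).count "&")
  let chunks := pvChunksB text.toList counts 0
  (Nowmap.zip chunks).map (fun rc => pvFillRow rc.1 w rc.2)

-- ===== PRECONDITION & SPEC =====
-- Pre_ excludes exactly the inputs where Python A raises IndexError: a row
-- shorter than the first row (row[col_index] out of range), or more '&' cells
-- (within the first len(Nowmap[0]) columns) than text has characters
-- (text[index] out of range).  B raises IndexError on the latter too.
def Pre_PutTextDe (Nowmap : List (List String)) (text : String) : Prop :=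
  (∀ row ∈ Nowmap, (Nowmap.headD []).length ≤ row.length) ∧
  (Nowmap.map (fun row => (row.take (Nowmap.headD []).length).count "&")).sum ≤ text.toList.length
instance (Nowmap : List (List String)) (text : String) : Decidable (Pre_PutTextDe Nowmap text) := by
  unfold Pre_PutTextDe; infer_instance

def pvWitness_PutTextDe : List (List String) × String := ([["&", "."], ["x", "&"]], "ab")

def Spec_PutTextDe (Nowmap : List (List String)) (text : String) (out : List (List String)) : Prop := out = PutTextDe_alt Nowmap text
instance (Nowmap : List (List String)) (text : String) (out : List (List String)) : Decidable (Spec_PutTextDe Nowmap text out) := by unfold Spec_PutTextDe; infer_instance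

-- ===== CLAIM (what is proved, stated in full; the proofs are below) =====
def Claim_equal_PutTextDe : Prop := ∀ (Nowmap : List (List String)) (text : String), Dom_PutTextDe Nowmap text → Pre_PutTextDe Nowmap text → Spec_PutTextDe Nowmap text (PutTextDe Nowmap text)

-- ===== LEMMAS AND PROOFS =====

-- canonical replacement: replace '&' cells by successive chars of cs from index i
def pvRepl (cs : List Char) : List String → Nat → List String × Nat
  | [], i => ([], i)
  | cell :: rest, i =>
      if cell = "&" then
        match cs[i]? with
        | some ch =>
            let r := pvRepl cs rest (i + 1)
            (String.ofList [ch] :: r.1, r.2)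
        | none => (cell :: rest, i)
      else
        let r := pvRepl cs rest i
        (cell :: r.1, r.2)

lemma pvRepl_snd (cs : List Char) : ∀ (cells : List String) (i : Nat),
    i + cells.count "&" ≤ cs.length →
    (pvRepl cs cells i).2 = i + cells.count "&" := by
  intro cells
  induction cells with
  | nil => intro i _; simp [pvRepl]
  | cons cell rest ih =>
      intro i h
      rw [List.count_cons] at h ⊢
      by_cases hc : cell = "&"
      · have hi : i < cs.length := by simp [hc] at h; omega
        simp only [pvRepl, hc, if_true, List.getElem?_eq_getElem hi]
        rw [ih (i + 1) (by simp [hc] at h ⊢; omega)]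
        simp; omega
      · simp only [pvRepl, hc, if_false]
        rw [ih i (by simpa [hc] using h)]
        simp [hc]

-- A's inner foldl computed as set-operations equals take/repl/drop form
lemma pvInnerA_eq (cs : List Char) : ∀ (m s : Nat) (row : List String) (i : Nat),
    s + m ≤ row.length →
    i + ((row.drop s).take m).count "&" ≤ cs.length →
    (List.range' s m).foldl (fun st c =>
      if st.2 > cs.length then st
      else if st.1.getD c "" == "&" then
        match cs[st.2]? with
        | some ch => (st.1.set c (String.ofList [ch]), st.2 + 1)
        | none => st
      else st) (row, i)
    = (row.take s ++ (pvRepl cs ((row.drop s).take m) i).1 ++ row.drop (s + m),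
       (pvRepl cs ((row.drop s).take m) i).2) := by
  intro m
  induction m with
  | zero =>
      intro s row i _ _
      simp [pvRepl, List.take_append_drop]
  | succ n ih =>
      intro s row i hlen h
      have hs : s < row.length := by omega
      have hdrop : row.drop s = row[s] :: row.drop (s + 1) := List.drop_eq_getElem_cons hs
      rw [hdrop, List.take_succ_cons] at h ⊢
      rw [List.range'_succ, List.foldl_cons]
      have hgetD : (row.getD s "" == "&") = (row[s] == "&") := by
        simp [List.getD, List.getElem?_eq_getElem hs]
      by_cases hc : row[s] = "&"
      · rw [List.count_cons] at h
        have hi : i < cs.length := by simp [hc] at h; omega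
        have hguard : ¬ (i > cs.length) := by omega
        simp only [hguard, if_false, hgetD, hc, beq_self_eq_true, if_true,
          List.getElem?_eq_getElem hi]
        set row' := row.set s (String.ofList [cs[i]]) with hrow'
        have hlen' : (s + 1) + n ≤ row'.length := by simp [hrow']; omega
        have hdrop' : row'.drop (s + 1) = row.drop (s + 1) := by
          rw [hrow']; exact List.drop_set_of_lt (Nat.lt_succ_self s)
        have h' : (i + 1) + ((row'.drop (s + 1)).take n).count "&" ≤ cs.length := by
          rw [hdrop']; simp [hc] at h; omega
        have := ih (s + 1) row' (i + 1) hlen' h'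
        rw [this, hdrop']
        have hsplit : row' = row.take s ++ String.ofList [cs[i]] :: row.drop (s + 1) := by
          rw [hrow', List.set_eq_take_append_cons_drop, if_pos hs]
        have htake' : row'.take (s + 1) = row.take s ++ [String.ofList [cs[i]]] := by
          rw [hsplit, List.take_append]
          have hlt : (row.take s).length = s := List.length_take_of_le (le_of_lt hs)
          rw [List.take_of_length_le (by omega), hlt]
          simp
        rw [htake']
        simp only [pvRepl, if_true, List.getElem?_eq_getElem hi]
        have hfix : s + 1 + n = s + (n + 1) := by omega
        simp [hfix, List.append_assoc]
        rw [hrow']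
        exact List.drop_set_of_lt (by omega)
      · rw [List.count_cons] at h
        have hguard : ¬ (i > cs.length) := by
          have : i + 0 ≤ cs.length := by simp [hc] at h; omega
          omega
        simp only [hguard, if_false, hgetD]
        have hcb : (row[s] == "&") = false := by simp [hc]
        simp only [hcb, Bool.false_eq_true, if_false]
        have h' : i + ((row.drop (s + 1)).take n).count "&" ≤ cs.length := by
          simp [hc] at h; omega
        have := ih (s + 1) row i (by omega) h'
        rw [this]
        simp only [pvRepl, hc, if_false]
        have htake : row.take (s + 1) = row.take s ++ [row[s]] := by
          rw [List.take_add_one, List.getElem?_eq_getElem hs]; rfl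
        have hfix : s + 1 + n = s + (n + 1) := by omega
        rw [hfix, htake]
        simp only [Prod.mk.injEq, List.append_assoc, List.cons_append]
        exact ⟨by trivial, by trivial⟩

-- B's fill loop equals pvRepl when the chunk is the matching slice of cs
lemma pvFillGo_eq (cs : List Char) (i0 K : Nat) (hK : i0 + K ≤ cs.length) :
    ∀ (cells out : List String) (j : Nat),
    j + cells.count "&" ≤ K →
    pvFillGo ((cs.drop i0).take K) cells out j
      = (out ++ (pvRepl cs cells (i0 + j)).1, j + cells.count "&") := by
  intro cells
  induction cells with
  | nil => intro out j _; simp [pvFillGo, pvRepl]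
  | cons cell rest ih =>
      intro out j h
      rw [List.count_cons] at h
      by_cases hc : cell = "&"
      · have hj : j < K := by simp [hc] at h; omega
        have hidx : i0 + j < cs.length := by omega
        have hchunk : ((cs.drop i0).take K)[j]? = some cs[i0 + j] := by
          rw [List.getElem?_take]
          simp [hj, List.getElem?_drop, List.getElem?_eq_getElem hidx]
        simp only [pvFillGo, hc, beq_self_eq_true, if_true, hchunk]
        rw [ih (out ++ [String.ofList [cs[i0 + j]]]) (j + 1) (by simp [hc] at h; omega)]
        simp only [pvRepl, if_true, List.getElem?_eq_getElem hidx]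
        have : i0 + (j + 1) = i0 + j + 1 := by omega
        rw [this]
        simp [List.append_assoc]
        omega
      · have hcb : (cell == "&") = false := by simp [hc]
        simp only [pvFillGo, hcb]
        rw [ih (out ++ [cell]) j (by simpa [hc] using h)]
        simp only [pvRepl, hc, if_false]
        simp [hc, List.append_assoc]

-- one row: A's inner loop result = B's pvFillRow on the matching chunk
lemma pvRow_eq (cs : List Char) (w : Nat) (row : List String) (i : Nat)
    (hlen : w ≤ row.length)
    (h : i + (row.take w).count "&" ≤ cs.length) :
    pvInnerA cs w row i
      = (pvFillRow row w ((cs.drop i).take ((row.take w).count "&")),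
         i + (row.take w).count "&") := by
  have hA := pvInnerA_eq cs w 0 row i (by omega) (by simpa using h)
  have hB := pvFillGo_eq cs i ((row.take w).count "&") h (row.take w) [] 0
    (by omega)
  unfold pvInnerA pvFillRow
  rw [List.range_eq_range', hA]
  simp only [List.drop_zero, List.take_zero, List.nil_append, Nat.zero_add,
    Nat.add_zero] at hB ⊢
  rw [hB]
  have hsnd := pvRepl_snd cs (row.take w) i h
  simp [hsnd]

-- main: A's outer loop equals B's zip-with-chunks map
lemma pvMain (cs : List Char) (w : Nat) : ∀ (rows : List (List String)) (i : Nat),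
    (∀ row ∈ rows, w ≤ row.length) →
    i + (rows.map (fun row => (row.take w).count "&")).sum ≤ cs.length →
    pvLoopA cs w rows i
      = ((rows.zip (pvChunksB cs (rows.map (fun row => (row.take w).count "&")) i)).map
           (fun rc => pvFillRow rc.1 w rc.2),
         i + (rows.map (fun row => (row.take w).count "&")).sum) := by
  intro rows
  induction rows with
  | nil => intro i _ _; simp [pvLoopA, pvChunksB]
  | cons row rest ih =>
      intro i hlen h
      simp only [List.map_cons, List.sum_cons] at h
      have hrow : i + (row.take w).count "&" ≤ cs.length := by omega
      have hr := pvRow_eq cs w row i (hlen row (List.mem_cons_self)) hrow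
      have ih' := ih (i + (row.take w).count "&")
        (fun r hrr => hlen r (List.mem_cons_of_mem _ hrr)) (by omega)
      simp only [pvLoopA, hr, ih', List.map_cons, pvChunksB, List.zip_cons_cons,
        List.sum_cons, Prod.mk.injEq]
      exact ⟨by trivial, by omega⟩

-- ===== VERDICT (by name: the statement is the Claim_ definition above) =====
theorem PutTextDe_spec : Claim_equal_PutTextDe := by
  intro Nowmap text _ hpre
  obtain ⟨hlen, hcnt⟩ := hpre
  unfold Spec_PutTextDe PutTextDe PutTextDe_alt
  have := pvMain text.toList (Nowmap.headD []).length Nowmap 0 hlen (by simpa using hcnt)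
  rw [this]
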